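-- pv_equiv track=rewrite | github.com/irisitystefannilsson/AdventOfCode2021 | main.py | ssf_leftmost_4
-- ===== SOURCE A (Python) =====
-- def ssf_leftmost_4(l):
--     depth = 0
--     for i in range(0, len(l)):
--         if l[i] == '[':
--             depth += 1
--         elif l[i] == ']':
--             depth -= 1
--         if depth == 5:
--             return i + 1
--     return 0
-- ===== SOURCE B (Python) =====
-- def ssf_leftmost_4(l):
--     # Divide and conquer over the sequence: solve(lo, hi, depth) returns
--     # (1-based hit position or None, depth after the part it processed).
--     def solve(lo, hi, depth):
--         if hi - lo == 0:
--             return (None, depth)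
--         if hi - lo == 1:
--             c = l[lo]
--             d = depth + (1 if c == '[' else (-1 if c == ']' else 0))
--             return ((lo + 1) if d == 5 else None, d)
--         mid = (lo + hi) // 2
--         hitL, dL = solve(lo, mid, depth)
--         if hitL is not None:
--             return (hitL, dL)
--         return solve(mid, hi, dL)
--     hit, _ = solve(0, len(l), 0)
--     return hit if hit is not None else 0
-- ===== Notes on version B (the rewrite author's own statement) =====
-- stated objective: alternative
-- what changed: A's single left-to-right loop with a mutable depth counter and early return is replaced by a divide-and-conquer recursion: the string is split in half, each half returns (first hit position, depth after it), and results are combined, the right half being solved under the left half's exit depth.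
import Mathlib
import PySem

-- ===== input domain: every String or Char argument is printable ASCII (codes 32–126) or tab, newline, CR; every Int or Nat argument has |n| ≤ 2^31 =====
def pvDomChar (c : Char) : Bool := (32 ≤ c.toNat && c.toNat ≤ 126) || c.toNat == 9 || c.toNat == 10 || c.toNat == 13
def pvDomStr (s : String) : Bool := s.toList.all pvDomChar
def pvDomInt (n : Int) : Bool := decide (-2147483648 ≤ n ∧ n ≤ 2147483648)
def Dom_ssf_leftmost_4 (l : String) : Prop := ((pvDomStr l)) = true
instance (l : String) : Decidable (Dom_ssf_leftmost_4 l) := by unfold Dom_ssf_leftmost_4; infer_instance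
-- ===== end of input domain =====

-- B replaces A's single early-returning loop with a mutable depth counter by a
-- divide-and-conquer recursion over string halves; same O(n) cost, no behaviour change.

-- ===== PORT A =====
-- the for-loop with early return, as structural recursion over the characters,
-- carrying the index i and the running depth
def ssfALoop : List Char → Int → Int → Int
  | [], _, _ => 0
  | c :: rest, i, depth =>
    let d := if c = '[' then depth + 1 else if c = ']' then depth - 1 else depth
    if d = 5 then i + 1 else ssfALoop rest (i + 1) d

def ssf_leftmost_4 (l : String) : Int := ssfALoop l.toList 0 0

-- ===== PORT B =====
def ssfDelta (c : Char) : Int := if c = '[' then 1 else if c = ']' then -1 else 0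

-- solve(segment, base index, entry depth) = (1-based hit position or none, depth after the
-- part processed); a segment of length ≥ 2 is split at its midpoint, the right half being
-- solved under the left half's exit depth — the combine step of Source B's solve
def ssfSolve : List Char → Int → Int → Option Int × Int
  | [], _, d => (none, d)
  | [c], i, d =>
    let d' := d + ssfDelta c
    (if d' = 5 then some (i + 1) else none, d')
  | c1 :: c2 :: rest, i, d =>
    let m := (c1 :: c2 :: rest).length / 2
    match ssfSolve ((c1 :: c2 :: rest).take m) i d with
    | (some h, dL) => (some h, dL)
    | (none, dL) => ssfSolve ((c1 :: c2 :: rest).drop m) (i + (m : Int)) dL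
  termination_by cs => cs.length
  decreasing_by
    · simp [List.length_take]; omega
    · simp [List.length_drop]; omega

def ssf_leftmost_4_alt (l : String) : Int :=
  match (ssfSolve l.toList 0 0).1 with
  | some h => h
  | none => 0

-- ===== PRECONDITION & SPEC =====
def Spec_ssf_leftmost_4 (l : String) (out : Int) : Prop := out = ssf_leftmost_4_alt l
instance (l : String) (out : Int) : Decidable (Spec_ssf_leftmost_4 l out) := by unfold Spec_ssf_leftmost_4; infer_instance

-- ===== CLAIM (what is proved, stated in full; the proofs are below) =====
def Claim_equal_ssf_leftmost_4 : Prop := ∀ (l : String), Dom_ssf_leftmost_4 l → Spec_ssf_leftmost_4 l (ssf_leftmost_4 l)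

-- ===== LEMMAS AND PROOFS =====

-- linear reference version of ssfSolve, used only as a bridge between the two ports
def ssfLin : List Char → Int → Int → Option Int × Int
  | [], _, d => (none, d)
  | c :: rest, i, d =>
    let d' := d + ssfDelta c
    if d' = 5 then (some (i + 1), d') else ssfLin rest (i + 1) d'

theorem ssfLin_append (xs ys : List Char) (i d : Int) :
    ssfLin (xs ++ ys) i d =
      match ssfLin xs i d with
      | (some h, dL) => (some h, dL)
      | (none, dL) => ssfLin ys (i + (xs.length : Int)) dL := by
  induction xs generalizing i d with
  | nil => simp [ssfLin]
  | cons c rest ih =>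
    simp only [List.cons_append, ssfLin]
    by_cases h5 : d + ssfDelta c = 5
    · simp [h5]
    · simp only [if_neg h5, ih]
      have : i + 1 + (rest.length : Int) = i + ((rest.length : Int) + 1) := by ring
      simp [this]

theorem ssfSolve_eq_lin (cs : List Char) (i d : Int) :
    ssfSolve cs i d = ssfLin cs i d := by
  fun_induction ssfSolve cs i d with
  | case1 => rfl
  | case2 c i d => simp only [ssfLin]; split <;> rfl
  | case3 c1 c2 rest i d m h dL heq ih1 =>
    have hs : (c1 :: c2 :: rest) = (c1 :: c2 :: rest).take m ++ (c1 :: c2 :: rest).drop m := by simp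
    conv_rhs => rw [hs]
    rw [ssfLin_append, ← ih1, heq]
  | case4 c1 c2 rest i d m dL heq ih1 ih2 =>
    have hs : (c1 :: c2 :: rest) = (c1 :: c2 :: rest).take m ++ (c1 :: c2 :: rest).drop m := by simp
    have hlen : (((c1 :: c2 :: rest).take m).length : Int) = (m : Int) := by
      rw [List.length_take, Nat.min_eq_left (Nat.div_le_self _ _)]
    conv_rhs => rw [hs]
    rw [ssfLin_append, ← ih1, heq, ih2, hlen]

theorem ssfALoop_eq_lin (cs : List Char) (i d : Int) :
    ssfALoop cs i d = (match (ssfLin cs i d).1 with | some h => h | none => 0) := by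
  induction cs generalizing i d with
  | nil => rfl
  | cons c rest ih =>
    simp only [ssfALoop, ssfLin]
    have hd : (if c = '[' then d + 1 else if c = ']' then d - 1 else d) = d + ssfDelta c := by
      unfold ssfDelta; split_ifs <;> ring
    rw [hd]
    by_cases h5 : d + ssfDelta c = 5
    · simp [h5]
    · simp [h5, ih]

-- ===== VERDICT (by name: the statement is the Claim_ definition above) =====
theorem ssf_leftmost_4_spec : Claim_equal_ssf_leftmost_4 := by
  intro l _
  unfold Spec_ssf_leftmost_4 ssf_leftmost_4 ssf_leftmost_4_alt
  rw [ssfSolve_eq_lin]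
  exact ssfALoop_eq_lin l.toList 0 0
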